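-- pv_equiv track=rewrite | github.com/Kimhyeonsuk/Programmers_Python | python_Algorithm/Level2/VisitDistance.py | solution
-- ===== SOURCE A (Python) =====
-- from collections import defaultdict
--
-- def solution(dirs):
--     answer = 0
--     loc=(0,0)
--     dirmap=dict()
--     dirmap['U']=0
--     dirmap['D']=1
--     dirmap['L']=2
--     dirmap['R']=3
--     dx=[-1,1,0,0]
--     dy=[0,0,-1,1]
--     mapdict = defaultdict(set)
--     for dir in dirs:
--         dirnum=dirmap[dir]
--         nx=loc[0]+dx[dirnum]
--         ny=loc[1]+dy[dirnum]
--
--         curstr = str(loc[0]) + str(loc[1])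
--         nextStr=str(nx)+str(ny)
--         if nx<-5 or ny<-5 or nx>5 or ny>5:continue
--         if nextStr in mapdict[curstr]:
--             loc=(nx,ny)
--             continue
--         mapdict[curstr].add(nextStr)
--         mapdict[nextStr].add(curstr)
--         answer+=1
--         loc=(nx,ny)
--     return answer
-- ===== SOURCE B (Python) =====
-- def solution(dirs):
--     delta = {'U': (-1, 0), 'D': (1, 0), 'L': (0, -1), 'R': (0, 1)}
--     codes = []
--     x = y = 0
--     for d in dirs:
--         mx, my = delta[d]
--         nx, ny = x + mx, y + my
--         if -5 <= nx <= 5 and -5 <= ny <= 5: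
--             a = (x + 5) * 11 + (y + 5)
--             b = (nx + 5) * 11 + (ny + 5)
--             codes.append(min(a, b) * 121 + max(a, b))
--             x, y = nx, ny
--     codes.sort()
--     count = 0
--     prev = None
--     for c in codes:
--         if c != prev:
--             count += 1
--             prev = c
--     return count
-- ===== Notes on version B (the rewrite author's own statement) =====
-- stated objective: alternative
-- what changed: Replaces the on-line counter with symmetric string-keyed adjacency sets by a staged pipeline: each in-bounds traversed edge is encoded as one integer (canonical cell index pair, min*121+max), all codes are collected in a plain list, which is then sorted and the distinct values counted in a single adjacent-comparison scan; no set/dict and no per-move membership test remain.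
import Mathlib
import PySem

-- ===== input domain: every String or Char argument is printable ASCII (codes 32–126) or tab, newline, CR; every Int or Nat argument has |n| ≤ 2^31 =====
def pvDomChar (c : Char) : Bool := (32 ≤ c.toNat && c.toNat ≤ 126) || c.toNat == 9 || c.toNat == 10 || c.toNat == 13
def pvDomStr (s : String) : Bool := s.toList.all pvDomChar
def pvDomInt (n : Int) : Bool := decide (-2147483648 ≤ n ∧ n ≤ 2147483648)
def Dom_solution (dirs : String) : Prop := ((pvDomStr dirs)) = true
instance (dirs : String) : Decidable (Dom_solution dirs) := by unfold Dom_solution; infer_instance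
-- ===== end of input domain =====

-- B replaces A's on-line counter with symmetric string-keyed adjacency sets by a staged
-- pipeline: encode each in-bounds traversed edge as one integer, collect the codes in a
-- list, sort it, and count distinct values in one adjacent-comparison scan (objective:
-- alternative; no set/dict and no per-move membership test remain).

-- ===== PORT A =====
-- A's dirmap / dx / dy (defined once in the Python body; hoisted as constants).
def dirmapA : PySem.Dict String Int :=
  ((((PySem.Dict.empty).insert "U" 0).insert "D" 1).insert "L" 2).insert "R" 3
def dxA : List Int := [-1, 1, 0, 0]
def dyA : List Int := [0, 0, -1, 1]

-- the body of A's 'for dir in dirs' loop; state = (answer, loc, mapdict).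
-- NOTE: the defaultdict reads 'mapdict[curstr]' / 'mapdict[nextStr]' also insert an
-- empty set on a missing key in Python; that implicit insertion changes no later
-- getD/membership result (the inserted value IS getD's default), so it is omitted.
def stepA (st : Int × (Int × Int) × PySem.Dict String (PySem.Set String)) (dir : Char) :
    Int × (Int × Int) × PySem.Dict String (PySem.Set String) :=
  let answer := st.1
  let loc := st.2.1
  let mapdict := st.2.2
  -- dirmap[dir]: KeyError for a non-direction character — excluded by Pre_
  let dirnum := dirmapA.getD (String.ofList [dir]) 0
  let nx := loc.1 + PySem.List.pyGetD dxA dirnum 0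
  let ny := loc.2 + PySem.List.pyGetD dyA dirnum 0
  let curstr := PySem.Int.toStr loc.1 ++ PySem.Int.toStr loc.2
  let nextStr := PySem.Int.toStr nx ++ PySem.Int.toStr ny
  if nx < -5 ∨ ny < -5 ∨ nx > 5 ∨ ny > 5 then (answer, loc, mapdict)
  else if (mapdict.getD curstr PySem.Set.empty).contains nextStr then (answer, (nx, ny), mapdict)
  else
    let md1 := mapdict.insert curstr ((mapdict.getD curstr PySem.Set.empty).add nextStr)
    let md2 := md1.insert nextStr ((md1.getD nextStr PySem.Set.empty).add curstr)
    (answer + 1, (nx, ny), md2)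

def solution (dirs : String) : Int :=
  (dirs.toList.foldl stepA (0, (0, 0), PySem.Dict.empty)).1

-- ===== PORT B =====
def deltaB : PySem.Dict String (Int × Int) :=
  PySem.Dict.ofList [("U", (-1, 0)), ("D", (1, 0)), ("L", (0, -1)), ("R", (0, 1))]

-- B's first pass: state = (x, y, codes); appends one integer edge code per real move.
def stepB (st : Int × Int × List Int) (d : Char) : Int × Int × List Int :=
  -- delta[d]: KeyError for a non-direction character — excluded by Pre_
  let m := deltaB.getD (String.ofList [d]) (0, 0)
  let nx := st.1 + m.1
  let ny := st.2.1 + m.2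
  if -5 ≤ nx ∧ nx ≤ 5 ∧ -5 ≤ ny ∧ ny ≤ 5 then
    let a := (st.1 + 5) * 11 + (st.2.1 + 5)
    let b := (nx + 5) * 11 + (ny + 5)
    (nx, ny, st.2.2 ++ [min a b * 121 + max a b])
  else st

-- B's final scan over the sorted codes: state = (count, prev).
def scanStep (st : Int × Option Int) (c : Int) : Int × Option Int :=
  if some c ≠ st.2 then (st.1 + 1, some c) else st

def solution_alt (dirs : String) : Int :=
  let codes := (dirs.toList.foldl stepB (0, 0, ([] : List Int))).2.2
  ((PySem.List.sorted codes (fun x => x) false).foldl scanStep (0, none)).1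

-- ===== PRECONDITION & SPEC =====
-- Pre_ excludes exactly the inputs containing a character that is not one of the four
-- direction letters; on those both Python A and Python B raise KeyError.
def Pre_solution (dirs : String) : Prop :=
  dirs.toList.all (fun c => c == 'U' || c == 'D' || c == 'L' || c == 'R') = true
instance (dirs : String) : Decidable (Pre_solution dirs) := by unfold Pre_solution; infer_instance

def pvWitness_solution : String := "UD"

def Spec_solution (dirs : String) (out : Int) : Prop := out = solution_alt dirs
instance (dirs : String) (out : Int) : Decidable (Spec_solution dirs out) := by unfold Spec_solution; infer_instance

-- ===== CLAIM (what is proved, stated in full; the proofs are below) =====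
def Claim_equal_solution : Prop := ∀ (dirs : String), Dom_solution dirs → Pre_solution dirs → Spec_solution dirs (solution dirs)

-- ===== LEMMAS AND PROOFS =====

-- the board cell bound of the problem
def pvInb (p : Int × Int) : Prop := -5 ≤ p.1 ∧ p.1 ≤ 5 ∧ -5 ≤ p.2 ∧ p.2 ≤ 5

-- A's string key for a cell
def pvKey (p : Int × Int) : String := PySem.Int.toStr p.1 ++ PySem.Int.toStr p.2

-- B's integer code for the undirected edge {p, q}
def pvEcode (p q : Int × Int) : Int :=
  let a := (p.1 + 5) * 11 + (p.2 + 5)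
  let b := (q.1 + 5) * 11 + (q.2 + 5)
  min a b * 121 + max a b

def pvCoords : List (Int × Int) :=
  (PySem.List.pyRange (-5) 6 1).flatMap (fun x => (PySem.List.pyRange (-5) 6 1).map (fun y => (x, y)))

lemma mem_pvCoords {p : Int × Int} (h : pvInb p) : p ∈ pvCoords := by
  obtain ⟨x, y⟩ := p
  obtain ⟨h1, h2, h3, h4⟩ := h
  simp only [pvCoords, List.mem_flatMap, List.mem_map, PySem.List.mem_pyRange_one]
  exact ⟨x, by omega, y, by omega, rfl⟩

set_option maxRecDepth 40000 in
lemma pvKey_inj_bool :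
    pvCoords.all (fun p => pvCoords.all (fun q => !(pvKey p == pvKey q) || (p == q))) = true := by
  decide

lemma pvKey_inj {p q : Int × Int} (hp : pvInb p) (hq : pvInb q) (h : pvKey p = pvKey q) : p = q := by
  have hb := pvKey_inj_bool
  rw [List.all_eq_true] at hb
  have := hb p (mem_pvCoords hp)
  rw [List.all_eq_true] at this
  have := this q (mem_pvCoords hq)
  simp only [Bool.or_eq_true, Bool.not_eq_true', beq_eq_false_iff_ne, beq_iff_eq] at this
  rcases this with h' | h'
  · exact absurd h h'
  · exact h'

lemma pvEcode_eq_iff {p q r s : Int × Int} (hp : pvInb p) (hq : pvInb q) (hr : pvInb r)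
    (hs : pvInb s) : pvEcode p q = pvEcode r s ↔ (p = r ∧ q = s) ∨ (p = s ∧ q = r) := by
  obtain ⟨p1, p2⟩ := p; obtain ⟨q1, q2⟩ := q; obtain ⟨r1, r2⟩ := r; obtain ⟨s1, s2⟩ := s
  unfold pvInb at hp hq hr hs
  dsimp at hp hq hr hs
  simp only [pvEcode, min_def, max_def, Prod.mk.injEq]
  split_ifs <;> omega

-- the coupling invariant between A's loop state and B's first-pass state
def pvInv (a : Int × (Int × Int) × PySem.Dict String (PySem.Set String))
    (b : Int × Int × List Int) : Prop :=
  pvInb a.2.1 ∧ a.2.1 = (b.1, b.2.1) ∧ a.1 = (b.2.2.toFinset.card : Int) ∧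
  ∀ p q, pvInb p → pvInb q →
    ((a.2.2.getD (pvKey p) PySem.Set.empty).contains (pvKey q) = true ↔ pvEcode p q ∈ b.2.2)

-- a generic move step: both steps with the displacement (mx, my) made explicit
def genA (mx my : Int) (st : Int × (Int × Int) × PySem.Dict String (PySem.Set String)) :
    Int × (Int × Int) × PySem.Dict String (PySem.Set String) :=
  let answer := st.1
  let loc := st.2.1
  let mapdict := st.2.2
  let nx := loc.1 + mx
  let ny := loc.2 + my
  let curstr := PySem.Int.toStr loc.1 ++ PySem.Int.toStr loc.2
  let nextStr := PySem.Int.toStr nx ++ PySem.Int.toStr ny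
  if nx < -5 ∨ ny < -5 ∨ nx > 5 ∨ ny > 5 then (answer, loc, mapdict)
  else if (mapdict.getD curstr PySem.Set.empty).contains nextStr then (answer, (nx, ny), mapdict)
  else
    let md1 := mapdict.insert curstr ((mapdict.getD curstr PySem.Set.empty).add nextStr)
    let md2 := md1.insert nextStr ((md1.getD nextStr PySem.Set.empty).add curstr)
    (answer + 1, (nx, ny), md2)

def genB (mx my : Int) (st : Int × Int × List Int) : Int × Int × List Int :=
  let nx := st.1 + mx
  let ny := st.2.1 + my
  if -5 ≤ nx ∧ nx ≤ 5 ∧ -5 ≤ ny ∧ ny ≤ 5 then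
    (nx, ny, st.2.2 ++ [pvEcode (st.1, st.2.1) (nx, ny)])
  else st

lemma stepA_U (st) : stepA st 'U' = genA (-1) 0 st := rfl
lemma stepA_D (st) : stepA st 'D' = genA 1 0 st := rfl
lemma stepA_L (st) : stepA st 'L' = genA 0 (-1) st := rfl
lemma stepA_R (st) : stepA st 'R' = genA 0 1 st := rfl
lemma stepB_U (st) : stepB st 'U' = genB (-1) 0 st := rfl
lemma stepB_D (st) : stepB st 'D' = genB 1 0 st := rfl
lemma stepB_L (st) : stepB st 'L' = genB 0 (-1) st := rfl
lemma stepB_R (st) : stepB st 'R' = genB 0 1 st := rfl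

lemma pvInv_gen (mx my : Int) (hm : ¬(mx = 0 ∧ my = 0)) (a b) (h : pvInv a b) :
    pvInv (genA mx my a) (genB mx my b) := by
  obtain ⟨ans, loc, md⟩ := a
  obtain ⟨x, y, codes⟩ := b
  obtain ⟨hinb, hloc, hans, hdict⟩ := h
  have hx : loc = (x, y) := hloc
  subst hx
  simp only at hinb hans hdict
  simp only [genA, genB]
  by_cases hout : x + mx < -5 ∨ y + my < -5 ∨ x + mx > 5 ∨ y + my > 5
  · have hbnd : ¬(-5 ≤ x + mx ∧ x + mx ≤ 5 ∧ -5 ≤ y + my ∧ y + my ≤ 5) := by omega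
    rw [if_pos hout, if_neg hbnd]
    exact ⟨hinb, rfl, hans, hdict⟩
  · have hbnd : -5 ≤ x + mx ∧ x + mx ≤ 5 ∧ -5 ≤ y + my ∧ y + my ≤ 5 := by omega
    rw [if_neg hout, if_pos hbnd]
    simp only [show ∀ a b : Int, PySem.Int.toStr a ++ PySem.Int.toStr b = pvKey (a, b) from fun a b => rfl]
    have hnb : pvInb (x + mx, y + my) := by unfold pvInb at *; dsimp at *; omega
    have hcurnext : (x, y) ≠ (x + mx, y + my) := by
      simp only [ne_eq, Prod.mk.injEq]; omega
    have hkey : pvKey (x, y) ≠ pvKey (x + mx, y + my) := fun h => hcurnext (pvKey_inj hinb hnb h)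
    have hcond := hdict (x, y) (x + mx, y + my) hinb hnb
    have hmemapp : ∀ p q, pvInb p → pvInb q →
        (pvEcode p q ∈ codes ++ [pvEcode (x, y) (x + mx, y + my)] ↔
          pvEcode p q ∈ codes ∨ (p = (x, y) ∧ q = (x + mx, y + my)) ∨
            (p = (x + mx, y + my) ∧ q = (x, y))) := by
      intro p q hpp hqq
      rw [List.mem_append, List.mem_singleton, pvEcode_eq_iff hpp hqq hinb hnb]
    by_cases hmem : (md.getD (pvKey (x, y)) PySem.Set.empty).contains (pvKey (x + mx, y + my)) = true
    · -- edge already seen: A skips the insertions; B's appended code is a duplicate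
      rw [if_pos hmem]
      have hin : pvEcode (x, y) (x + mx, y + my) ∈ codes := hcond.mp hmem
      refine ⟨hnb, rfl, ?_, ?_⟩
      · rw [List.toFinset_append]
        have : ([pvEcode (x, y) (x + mx, y + my)] : List Int).toFinset ⊆ codes.toFinset := by
          intro z hz
          simp only [List.toFinset_cons, List.toFinset_nil, insert_empty_eq,
            Finset.mem_singleton] at hz
          rw [hz, List.mem_toFinset]; exact hin
        rw [Finset.union_eq_left.mpr this]
        exact hans
      · intro p q hpp hqq
        dsimp only
        rw [hmemapp p q hpp hqq, hdict p q hpp hqq]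
        constructor
        · exact fun h => Or.inl h
        · rintro (h | (⟨h1, h2⟩ | ⟨h1, h2⟩))
          · exact h
          · subst h1; subst h2; exact hin
          · subst h1; subst h2
            have : pvEcode (x + mx, y + my) (x, y) = pvEcode (x, y) (x + mx, y + my) := by
              rw [pvEcode_eq_iff hnb hinb hinb hnb]; exact Or.inr ⟨rfl, rfl⟩
            rw [this]; exact hin
    · rw [if_neg hmem]
      have hnotin : pvEcode (x, y) (x + mx, y + my) ∉ codes := fun h => hmem (hcond.mpr h)
      refine ⟨hnb, rfl, ?_, ?_⟩
      · rw [List.toFinset_append]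
        have hset : codes.toFinset ∪ ([pvEcode (x, y) (x + mx, y + my)] : List Int).toFinset =
            insert (pvEcode (x, y) (x + mx, y + my)) codes.toFinset := by
          simp only [List.toFinset_cons, List.toFinset_nil, insert_empty_eq]
          rw [Finset.union_comm, ← Finset.insert_eq]
        rw [hset, Finset.card_insert_of_notMem (by rwa [List.mem_toFinset])]
        push_cast
        omega
      · intro p q hpp hqq
        dsimp only
        rw [hmemapp p q hpp hqq]
        have hSne : pvKey (x + mx, y + my) ≠ pvKey (x, y) := fun h => hkey h.symm
        rw [PySem.Dict.getD_insert]
        by_cases hpn : pvKey p = pvKey (x + mx, y + my)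
        · have hp' : p = (x + mx, y + my) := pvKey_inj hpp hnb hpn
          subst hp'
          rw [if_pos hpn, PySem.Dict.getD_insert, if_neg hSne]
          rw [PySem.Set.contains_iff, PySem.Set.mem_add]
          constructor
          · rintro (h | h)
            · exact Or.inl ((hdict _ q hnb hqq).mp (by rwa [PySem.Set.contains_iff]))
            · right
              have : q = (x, y) := pvKey_inj hqq hinb h
              subst this; exact Or.inr ⟨rfl, rfl⟩
          · rintro (h | (⟨h1, h2⟩ | ⟨h1, h2⟩))
            · exact Or.inl ((hdict _ q hnb hqq).mpr h |> (PySem.Set.contains_iff _ _).mp)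
            · exact absurd h1 (by simp only [Prod.mk.injEq]; omega)
            · right; rw [h2]
        · rw [if_neg hpn]
          by_cases hpc : pvKey p = pvKey (x, y)
          · have hp' : p = (x, y) := pvKey_inj hpp hinb hpc
            subst hp'
            rw [PySem.Dict.getD_insert, if_pos hpc]
            rw [PySem.Set.contains_iff, PySem.Set.mem_add]
            constructor
            · rintro (h | h)
              · exact Or.inl ((hdict _ q hinb hqq).mp (by rwa [PySem.Set.contains_iff]))
              · right
                have : q = (x + mx, y + my) := pvKey_inj hqq hnb h
                subst this; exact Or.inl ⟨rfl, rfl⟩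
            · rintro (h | (⟨h1, h2⟩ | ⟨h1, h2⟩))
              · exact Or.inl ((hdict _ q hinb hqq).mpr h |> (PySem.Set.contains_iff _ _).mp)
              · right; rw [h2]
              · exact absurd h1 (by simp only [Prod.mk.injEq]; omega)
          · rw [PySem.Dict.getD_insert, if_neg hpc]
            rw [hdict p q hpp hqq]
            constructor
            · exact fun h => Or.inl h
            · rintro (h | (⟨h1, h2⟩ | ⟨h1, h2⟩))
              · exact h
              · exact absurd (congrArg pvKey h1) hpc
              · exact absurd (congrArg pvKey h1) hpn

lemma pvInv_step (a b c) (hc : c = 'U' ∨ c = 'D' ∨ c = 'L' ∨ c = 'R') (h : pvInv a b) :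
    pvInv (stepA a c) (stepB b c) := by
  rcases hc with rfl | rfl | rfl | rfl
  · rw [stepA_U, stepB_U]; exact pvInv_gen _ _ (by omega) _ _ h
  · rw [stepA_D, stepB_D]; exact pvInv_gen _ _ (by omega) _ _ h
  · rw [stepA_L, stepB_L]; exact pvInv_gen _ _ (by omega) _ _ h
  · rw [stepA_R, stepB_R]; exact pvInv_gen _ _ (by omega) _ _ h

lemma pvInv_foldl (l : List Char) :
    ∀ a b, (∀ c ∈ l, c = 'U' ∨ c = 'D' ∨ c = 'L' ∨ c = 'R') → pvInv a b →
    pvInv (l.foldl stepA a) (l.foldl stepB b) := by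
  induction l with
  | nil => exact fun a b _ h => h
  | cons c l ih =>
    intro a b hc h
    simp only [List.foldl_cons]
    exact ih _ _ (fun d hd => hc d (List.mem_cons_of_mem _ hd))
      (pvInv_step a b c (hc c (List.mem_cons_self)) h)

lemma pvInv_init : pvInv (0, (0, 0), PySem.Dict.empty) (0, 0, ([] : List Int)) := by
  refine ⟨by unfold pvInb; dsimp; omega, rfl, rfl, ?_⟩
  intro p q _ _
  simp [PySem.Dict.getD_empty, PySem.Set.empty, PySem.Set.contains]

-- B's scan over a weakly increasing list counts its distinct elements
lemma pvScan_aux (l : List Int) : ∀ (k p : Int), (∀ x ∈ l, p ≤ x) → l.Pairwise (· ≤ ·) →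
    (l.foldl scanStep (k, some p)).1 = k + ((l.toFinset.erase p).card : Int) := by
  induction l with
  | nil => intro k p _ _; simp
  | cons c cs ih =>
    intro k p hle hs
    have hpc : p ≤ c := hle c (List.mem_cons_self)
    have hcs : ∀ x ∈ cs, c ≤ x := (List.pairwise_cons.mp hs).1
    have hs' : cs.Pairwise (· ≤ ·) := (List.pairwise_cons.mp hs).2
    by_cases hec : p = c
    · subst hec
      have : scanStep (k, some p) p = (k, some p) := by simp [scanStep]
      rw [List.foldl_cons, this, ih k p hcs hs']
      congr 2
      rw [List.toFinset_cons, Finset.erase_insert_eq_erase]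
    · have hlt : p < c := lt_of_le_of_ne hpc hec
      have hcp : c ≠ p := fun h => hec h.symm
      have : scanStep (k, some p) c = (k + 1, some c) := by
        simp [scanStep, hcp]
      rw [List.foldl_cons, this, ih (k + 1) c hcs hs']
      have hpnot : p ∉ (c :: cs).toFinset := by
        simp only [List.toFinset_cons, Finset.mem_insert, List.mem_toFinset]
        rintro (h | h)
        · exact hec h
        · exact absurd (hcs p h) (by omega)
      rw [Finset.erase_eq_of_notMem hpnot, List.toFinset_cons]
      have : insert c cs.toFinset = insert c (cs.toFinset.erase c) := by
        ext z; simp only [Finset.mem_insert, Finset.mem_erase]; tauto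
      rw [this, Finset.card_insert_of_notMem (Finset.notMem_erase _ _)]
      push_cast
      omega

lemma pvScan_sorted (l : List Int) (hs : l.Pairwise (· ≤ ·)) :
    (l.foldl scanStep (0, (none : Option Int))).1 = (l.toFinset.card : Int) := by
  cases l with
  | nil => simp
  | cons c cs =>
    have hcs : ∀ x ∈ cs, c ≤ x := (List.pairwise_cons.mp hs).1
    have hs' : cs.Pairwise (· ≤ ·) := (List.pairwise_cons.mp hs).2
    have h1 : scanStep (0, (none : Option Int)) c = (1, some c) := by simp [scanStep]
    rw [List.foldl_cons, h1, pvScan_aux cs 1 c hcs hs']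
    rw [List.toFinset_cons]
    have : insert c cs.toFinset = insert c (cs.toFinset.erase c) := by
      ext z; simp only [Finset.mem_insert, Finset.mem_erase]; tauto
    rw [this, Finset.card_insert_of_notMem (Finset.notMem_erase _ _)]
    push_cast
    omega

-- ===== VERDICT (by name: the statement is the Claim_ definition above) =====
theorem solution_spec : Claim_equal_solution := by
  intro dirs _ hpre
  unfold Spec_solution solution solution_alt
  have hpre' : ∀ c ∈ dirs.toList, c = 'U' ∨ c = 'D' ∨ c = 'L' ∨ c = 'R' := by
    intro c hc
    have := (List.all_eq_true.mp hpre) c hc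
    simp only [Bool.or_eq_true, beq_iff_eq] at this
    tauto
  have h := pvInv_foldl dirs.toList _ _ hpre' pvInv_init
  have hcount := h.2.2.1
  set codes := (dirs.toList.foldl stepB (0, 0, ([] : List Int))).2.2 with hcodes
  have hperm : (PySem.List.sorted codes (fun x => x) false).Perm codes :=
    PySem.List.sorted_perm codes (fun x => x) false
  have hpw : (PySem.List.sorted codes (fun x => x) false).Pairwise (· ≤ ·) :=
    PySem.List.sorted_pairwise codes (fun x => x)
  rw [pvScan_sorted _ hpw, List.toFinset_eq_of_perm _ _ hperm]
  exact hcount
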